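-- pv_equiv track=rewrite | github.com/nherbaut/scholar.miage.dev | app/app/query_analyzer.py | _split_top_level_boolean
-- ===== SOURCE A (Python) =====
-- def _is_boundary(char):
--     return char is None or char.isspace() or char in "()"
--
-- def _match_boolean_operator(expr: str, idx: int):
--     for op in ("AND", "OR"):
--         end = idx + len(op)
--         if expr[idx:end].upper() == op:
--             prev_ok = _is_boundary(expr[idx - 1] if idx > 0 else None)
--             next_ok = _is_boundary(expr[end] if end < len(expr) else None)
--             if prev_ok and next_ok:
--                 return op
--     return None
--
-- def _split_top_level_boolean(expr: str):
--     """
--     Split a function argument into top-level terms separated by AND/OR.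
--     Only splits when the AND/OR is not inside quotes or parentheses.
--     """
--     terms = []
--     operators = []
--     buf = []
--     depth = 0
--     in_quote = False
--     i = 0
--     n = len(expr)
--
--     while i < n:
--         c = expr[i]
--
--         if c == '"':
--             in_quote = not in_quote
--             buf.append(c)
--             i += 1
--             continue
--
--         if not in_quote:
--             if c == '(':
--                 depth += 1
--             elif c == ')':
--                 depth = max(depth - 1, 0)
--
--             if depth == 0:
--                 op = _match_boolean_operator(expr, i)
--                 if op:
--                     terms.append("".join(buf).strip())
--                     operators.append(op)
--                     buf = []
--                     i += len(op)
--                     while i < n and expr[i].isspace():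
--                         i += 1
--                     continue
--
--         buf.append(c)
--         i += 1
--
--     terms.append("".join(buf).strip())
--
--     if any(term == "" for term in terms) or len(terms) <= 1:
--         return [], []
--
--     return terms, operators
-- ===== SOURCE B (Python) =====
-- def _is_boundary(char):
--     return char is None or char.isspace() or char in "()"
--
-- def _match_boolean_operator(expr: str, idx: int):
--     for op in ("AND", "OR"):
--         end = idx + len(op)
--         if expr[idx:end].upper() == op:
--             prev_ok = _is_boundary(expr[idx - 1] if idx > 0 else None)
--             next_ok = _is_boundary(expr[end] if end < len(expr) else None)
--             if prev_ok and next_ok: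
--                 return op
--     return None
--
-- def _split_top_level_boolean(expr: str):
--     """
--     Split a function argument into top-level terms separated by AND/OR.
--     Two-pass: first record the (start, resume) split points of every
--     top-level operator, then slice the expression between them.
--     """
--     n = len(expr)
--     hits = []  # (match_start, resume_index, op)
--     depth = 0
--     in_quote = False
--     i = 0
--     while i < n:
--         c = expr[i]
--         if c == '"':
--             in_quote = not in_quote
--             i += 1
--             continue
--         if not in_quote:
--             if c == '(':
--                 depth += 1
--             elif c == ')':
--                 depth = max(depth - 1, 0)
--             if depth == 0:
--                 op = _match_boolean_operator(expr, i)
--                 if op: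
--                     j = i + len(op)
--                     while j < n and expr[j].isspace():
--                         j += 1
--                     hits.append((i, j, op))
--                     i = j
--                     continue
--         i += 1
--
--     terms = []
--     prev = 0
--     for start, resume, _ in hits:
--         terms.append(expr[prev:start].strip())
--         prev = resume
--     terms.append(expr[prev:].strip())
--
--     if any(t == "" for t in terms) or len(terms) <= 1:
--         return [], []
--     return terms, [op for _, _, op in hits]
-- ===== Notes on version B (the rewrite author's own statement) =====
-- stated objective: alternative
-- what changed: B replaces A's per-character buffer accumulation with a two-pass decomposition: a first scan records the (start, resume) split points of every top-level AND/OR, then a second pass slices the expression between those points and strips each slice.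
import Mathlib
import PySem

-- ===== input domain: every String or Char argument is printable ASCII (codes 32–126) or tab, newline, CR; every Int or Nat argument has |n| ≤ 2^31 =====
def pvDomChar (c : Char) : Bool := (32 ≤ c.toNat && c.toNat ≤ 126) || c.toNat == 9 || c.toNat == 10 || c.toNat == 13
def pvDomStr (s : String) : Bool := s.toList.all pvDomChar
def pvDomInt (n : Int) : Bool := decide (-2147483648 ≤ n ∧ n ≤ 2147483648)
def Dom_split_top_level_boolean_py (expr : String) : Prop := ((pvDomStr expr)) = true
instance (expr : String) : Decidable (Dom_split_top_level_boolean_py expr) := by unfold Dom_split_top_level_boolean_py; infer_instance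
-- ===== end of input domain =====

-- B replaces A's character-buffer accumulation with a two-pass decomposition (record
-- top-level operator split points, then slice the string between them); objective: alternative.

-- ===== PORT A =====
-- _is_boundary(char): char is None or char.isspace() or char in "()"
def pvIsBoundary (c? : Option Char) : Bool :=
  match c? with
  | none => true
  | some c => PySem.Chars.isspace c || c = '(' || c = ')'

-- _match_boolean_operator(expr, idx): the for-loop over ("AND", "OR") unrolled.
def pvMatchOp (cs : List Char) (i : Nat) : Option String :=
  if PySem.Chars.upper (PySem.List.slice cs (some (i : Int)) (some ((i : Int) + 3))) = "AND".toList
      && pvIsBoundary (if 0 < i then cs[i - 1]? else none)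
      && pvIsBoundary cs[i + 3]? then
    some "AND"
  else if PySem.Chars.upper (PySem.List.slice cs (some (i : Int)) (some ((i : Int) + 2))) = "OR".toList
      && pvIsBoundary (if 0 < i then cs[i - 1]? else none)
      && pvIsBoundary cs[i + 2]? then
    some "OR"
  else
    none

-- the inner "while i < n and expr[i].isspace(): i += 1" loop (shared text of both Pythons)
def pvSkipWs (cs : List Char) (i : Nat) : Nat :=
  if h : i < cs.length then
    if PySem.Chars.isspace cs[i] then pvSkipWs cs (i + 1) else i
  else i
termination_by cs.length - i

theorem le_pvSkipWs (cs : List Char) (i : Nat) : i ≤ pvSkipWs cs i := by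
  rw [pvSkipWs]
  split
  · split
    · exact le_trans (Nat.le_succ i) (le_pvSkipWs cs (i + 1))
    · exact le_refl i
  · exact le_refl i
termination_by cs.length - i

theorem pvMatchOp_pos {cs : List Char} {i : Nat} {op : String}
    (h : pvMatchOp cs i = some op) : 0 < op.toList.length := by
  unfold pvMatchOp at h
  split_ifs at h <;> cases h <;> decide

-- the final "terms.append…; if any(...) or len(terms) <= 1: return [],[]" tail (identical text in both Pythons)
def pvFinish (terms ops : List String) : List String × List String :=
  if terms.any (fun t => t = "") || decide (terms.length ≤ 1) then ([], [])
  else (terms, ops)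

-- the main while-loop of A, state (i, buf, terms, operators, depth, in_quote)
def pvLoopA (cs : List Char) (i : Nat) (buf : List Char) (terms ops : List String)
    (depth : Int) (inq : Bool) : List String × List String :=
  if h : i < cs.length then
    let c := cs[i]
    if c = '"' then
      pvLoopA cs (i + 1) (buf ++ [c]) terms ops depth (!inq)
    else if inq = false then
      let depth' := if c = '(' then depth + 1 else if c = ')' then max (depth - 1) 0 else depth
      if depth' = 0 then
        match hm : pvMatchOp cs i with
        | some op =>
            pvLoopA cs (pvSkipWs cs (i + op.toList.length)) []
              (terms ++ [String.ofList (PySem.Chars.strip buf)]) (ops ++ [op]) depth' inq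
        | none => pvLoopA cs (i + 1) (buf ++ [c]) terms ops depth' inq
      else pvLoopA cs (i + 1) (buf ++ [c]) terms ops depth' inq
    else pvLoopA cs (i + 1) (buf ++ [c]) terms ops depth inq
  else
    pvFinish (terms ++ [String.ofList (PySem.Chars.strip buf)]) ops
termination_by cs.length - i
decreasing_by
  · omega
  · have h1 := le_pvSkipWs cs (i + op.toList.length)
    have h2 := pvMatchOp_pos hm
    omega
  · omega
  · omega
  · omega

def split_top_level_boolean_py (expr : String) : List String × List String :=
  pvLoopA expr.toList 0 [] [] [] 0 false

-- ===== PORT B =====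
-- first pass: record every top-level operator hit as (match_start, resume_index, op)
def pvScanB (cs : List Char) (i : Nat) (depth : Int) (inq : Bool) :
    List (Nat × Nat × String) :=
  if h : i < cs.length then
    let c := cs[i]
    if c = '"' then
      pvScanB cs (i + 1) depth (!inq)
    else if inq = false then
      let depth' := if c = '(' then depth + 1 else if c = ')' then max (depth - 1) 0 else depth
      if depth' = 0 then
        match hm : pvMatchOp cs i with
        | some op =>
            let j := pvSkipWs cs (i + op.toList.length)
            (i, j, op) :: pvScanB cs j depth' inq
        | none => pvScanB cs (i + 1) depth' inq
      else pvScanB cs (i + 1) depth' inq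
    else pvScanB cs (i + 1) depth inq
  else []
termination_by cs.length - i
decreasing_by
  · omega
  · have h1 := le_pvSkipWs cs (i + op.toList.length)
    have h2 := pvMatchOp_pos hm
    omega
  · omega
  · omega
  · omega

-- second pass: slice the expression between the recorded split points
def pvSegsB (cs : List Char) (prev : Nat) (hits : List (Nat × Nat × String)) : List String :=
  match hits with
  | [] => [String.ofList (PySem.Chars.strip (PySem.List.slice cs (some (prev : Int)) none))]
  | (s, r, _) :: rest =>
      String.ofList (PySem.Chars.strip (PySem.List.slice cs (some (prev : Int)) (some (s : Int))))
        :: pvSegsB cs r rest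

def split_top_level_boolean_py_alt (expr : String) : List String × List String :=
  let cs := expr.toList
  let hits := pvScanB cs 0 0 false
  pvFinish (pvSegsB cs 0 hits) (hits.map (fun h => h.2.2))

-- ===== PRECONDITION & SPEC =====
def Spec_split_top_level_boolean_py (expr : String) (out : List String × List String) : Prop := out = split_top_level_boolean_py_alt expr
instance (expr : String) (out : List String × List String) : Decidable (Spec_split_top_level_boolean_py expr out) := by unfold Spec_split_top_level_boolean_py; infer_instance

-- ===== CLAIM (what is proved, stated in full; the proofs are below) =====
def Claim_equal_split_top_level_boolean_py : Prop := ∀ (expr : String), Dom_split_top_level_boolean_py expr → Spec_split_top_level_boolean_py expr (split_top_level_boolean_py expr)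

-- ===== LEMMAS AND PROOFS =====

-- buf at scan position i, when the current segment started at start: expr[start:i]
def pvSeg (cs : List Char) (a b : Nat) : List Char := (cs.drop a).take (b - a)

theorem pvSeg_refl (cs : List Char) (a : Nat) : pvSeg cs a a = [] := by
  simp [pvSeg]

theorem pvSeg_snoc {cs : List Char} {a i : Nat} (hai : a ≤ i) (hi : i < cs.length) :
    pvSeg cs a i ++ [cs[i]] = pvSeg cs a (i + 1) := by
  have h1 : i + 1 - a = (i - a) + 1 := by omega
  rw [pvSeg, pvSeg, h1, List.take_add_one]
  have h2 : (cs.drop a)[i - a]? = some cs[i] := by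
    rw [List.getElem?_drop]
    have : a + (i - a) = i := by omega
    rw [this, List.getElem?_eq_getElem hi]
  simp [h2]

theorem pvSeg_full {cs : List Char} {a : Nat} :
    pvSeg cs a cs.length = cs.drop a := by
  rw [pvSeg]
  exact List.take_of_length_le (by simp)

theorem pvUpperLenAND {cs : List Char} {i : Nat} (b1 b2 : Bool)
    (h : (decide (PySem.Chars.upper (PySem.List.slice cs (some (i : Int)) (some ((i : Int) + 3))) = "AND".toList) && b1 && b2) = true) :
    i + "AND".toList.length ≤ cs.length := by
  simp only [Bool.and_eq_true, decide_eq_true_eq] at h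
  have hlen := congrArg List.length h.1.1
  have h3 : ((i : Int) + 3) = ((i + 3 : Nat) : Int) := by push_cast; ring
  rw [h3, PySem.List.slice_natCast] at hlen
  simp [PySem.Chars.upper] at hlen
  show i + 3 ≤ cs.length
  omega

theorem pvUpperLenOR {cs : List Char} {i : Nat} (b1 b2 : Bool)
    (h : (decide (PySem.Chars.upper (PySem.List.slice cs (some (i : Int)) (some ((i : Int) + 2))) = "OR".toList) && b1 && b2) = true) :
    i + "OR".toList.length ≤ cs.length := by
  simp only [Bool.and_eq_true, decide_eq_true_eq] at h
  have hlen := congrArg List.length h.1.1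
  have h3 : ((i : Int) + 2) = ((i + 2 : Nat) : Int) := by push_cast; ring
  rw [h3, PySem.List.slice_natCast] at hlen
  simp [PySem.Chars.upper] at hlen
  show i + 2 ≤ cs.length
  omega

theorem pvMatchOp_le_length {cs : List Char} {i : Nat} {op : String}
    (h : pvMatchOp cs i = some op) : i + op.toList.length ≤ cs.length := by
  unfold pvMatchOp at h
  split_ifs at h with h1 h2 h3 h4 h5 <;> cases h <;>
    first
      | exact pvUpperLenAND _ _ h2
      | exact pvUpperLenOR _ _ h3
      | exact pvUpperLenAND _ _ h4
      | exact pvUpperLenOR _ _ h5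

theorem pvSkipWs_le_length {cs : List Char} {i : Nat} (h : i ≤ cs.length) :
    pvSkipWs cs i ≤ cs.length := by
  rw [pvSkipWs]
  split
  · split
    · exact pvSkipWs_le_length (by omega)
    · exact h
  · exact h
termination_by cs.length - i

theorem pvLoopA_eq (cs : List Char) :
    ∀ (fuel i start : Nat) (terms ops : List String) (depth : Int) (inq : Bool),
      cs.length - i ≤ fuel → start ≤ i → i ≤ cs.length →
      pvLoopA cs i (pvSeg cs start i) terms ops depth inq
        = pvFinish (terms ++ pvSegsB cs start (pvScanB cs i depth inq))
            (ops ++ (pvScanB cs i depth inq).map (fun h => h.2.2)) := by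
  intro fuel
  induction fuel with
  | zero =>
      intro i start terms ops depth inq hf hs hi
      have hin : i = cs.length := by omega
      rw [pvLoopA, pvScanB]
      rw [dif_neg (by omega), dif_neg (by omega)]
      subst hin
      simp [pvSegsB, pvSeg_full, PySem.List.slice_from_natCast]
  | succ fuel ih =>
      intro i start terms ops depth inq hf hs hi
      by_cases h : i < cs.length
      · rw [pvLoopA, pvScanB, dif_pos h, dif_pos h]
        simp only
        by_cases hq : cs[i] = '"'
        · simp only [if_pos hq]
          rw [pvSeg_snoc hs h]
          exact ih (i + 1) start terms ops depth (!inq) (by omega) (by omega) (by omega)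
        · simp only [if_neg hq]
          by_cases hiq : inq = false
          · simp only [if_pos hiq]
            set depth' := if cs[i] = '(' then depth + 1 else if cs[i] = ')' then max (depth - 1) 0 else depth with hd
            by_cases hz : depth' = 0
            · simp only [if_pos hz]
              cases hm : pvMatchOp cs i with
              | none =>
                  rw [pvSeg_snoc hs h]
                  exact ih (i + 1) start terms ops depth' inq (by omega) (by omega) (by omega)
              | some op =>
                  have hlen := pvMatchOp_le_length hm
                  have hpos := pvMatchOp_pos hm
                  have hle := le_pvSkipWs cs (i + op.toList.length)
                  have hju : pvSkipWs cs (i + op.toList.length) ≤ cs.length :=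
                    pvSkipWs_le_length (by omega)
                  have hrec := ih (pvSkipWs cs (i + op.toList.length))
                    (pvSkipWs cs (i + op.toList.length))
                    (terms ++ [String.ofList (PySem.Chars.strip (pvSeg cs start i))])
                    (ops ++ [op]) depth' inq (by omega) (le_refl _) hju
                  rw [pvSeg_refl] at hrec
                  have hseg : PySem.List.slice cs (some (start : Int)) (some (i : Int))
                      = pvSeg cs start i := by
                    rw [PySem.List.slice_natCast, pvSeg]
                  show pvLoopA cs (pvSkipWs cs (i + op.toList.length)) []
                      (terms ++ [String.ofList (PySem.Chars.strip (pvSeg cs start i))]) (ops ++ [op]) depth' inq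
                    = pvFinish (terms ++ pvSegsB cs start
                        ((i, pvSkipWs cs (i + op.toList.length), op) :: pvScanB cs (pvSkipWs cs (i + op.toList.length)) depth' inq))
                      (ops ++ List.map (fun h => h.2.2)
                        ((i, pvSkipWs cs (i + op.toList.length), op) :: pvScanB cs (pvSkipWs cs (i + op.toList.length)) depth' inq))
                  rw [hrec]
                  simp only [pvSegsB, hseg, List.map_cons]
                  simp [List.append_assoc]
            · simp only [if_neg hz]
              rw [pvSeg_snoc hs h]
              exact ih (i + 1) start terms ops depth' inq (by omega) (by omega) (by omega)
          · simp only [if_neg hiq]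
            rw [pvSeg_snoc hs h]
            exact ih (i + 1) start terms ops depth inq (by omega) (by omega) (by omega)
      · have hin : i = cs.length := by omega
        rw [pvLoopA, pvScanB, dif_neg h, dif_neg h]
        subst hin
        simp [pvSegsB, pvSeg_full, PySem.List.slice_from_natCast]

-- ===== VERDICT (by name: the statement is the Claim_ definition above) =====
theorem split_top_level_boolean_py_spec : Claim_equal_split_top_level_boolean_py := by
  intro expr _
  unfold Spec_split_top_level_boolean_py split_top_level_boolean_py split_top_level_boolean_py_alt
  have := pvLoopA_eq expr.toList expr.toList.length 0 0 [] [] 0 false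
    (by omega) (by omega) (by omega)
  rw [pvSeg_refl] at this
  simpa using this
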